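-- pv_equiv track=rewrite | github.com/PKazm/SF2_Eth_FFT | Python/ETH_Sample_Streamer.py | build_UDP_frames
-- ===== SOURCE A (Python) =====
-- import math
--
-- def build_UDP_frames(data_list, bytes_per_item):
--     data_cnt = len(data_list)
--     items_per_frame = math.floor(1024 / bytes_per_item)
--     data_list_pos = 0
--     frame_list = []
--
--
--     while(data_list_pos != data_cnt):
--         frame_data = []
--         for i in range(0, min(items_per_frame, data_cnt - data_list_pos)):
--             temp_bytes = data_list[data_list_pos].to_bytes(bytes_per_item, 'big', signed=True)
--             frame_data[len(frame_data):len(frame_data)] = (temp_bytes)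
--             data_list_pos += 1
--         frame_list.append(frame_data)
--
--     return frame_list
-- ===== SOURCE B (Python) =====
-- import math
--
-- def build_UDP_frames(data_list, bytes_per_item):
--     # Flatten everything to one byte stream, then cut it into frame-sized slices.
--     items_per_frame = math.floor(1024 / bytes_per_item)
--     frame_bytes = items_per_frame * bytes_per_item
--     all_bytes = [b for item in data_list
--                    for b in item.to_bytes(bytes_per_item, 'big', signed=True)]
--     frames = []
--     pos = 0
--     while pos != len(all_bytes):
--         chunk = all_bytes[pos:pos + frame_bytes]
--         frames.append(chunk)
--         pos += len(chunk)
--     return frames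
-- ===== Notes on version B (the rewrite author's own statement) =====
-- stated objective: alternative
-- what changed: A fills each frame with a nested per-item loop that advances a shared position counter; B first flattens the whole list into one byte stream via to_bytes and then cuts that stream into frame-sized slices.
import Mathlib
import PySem

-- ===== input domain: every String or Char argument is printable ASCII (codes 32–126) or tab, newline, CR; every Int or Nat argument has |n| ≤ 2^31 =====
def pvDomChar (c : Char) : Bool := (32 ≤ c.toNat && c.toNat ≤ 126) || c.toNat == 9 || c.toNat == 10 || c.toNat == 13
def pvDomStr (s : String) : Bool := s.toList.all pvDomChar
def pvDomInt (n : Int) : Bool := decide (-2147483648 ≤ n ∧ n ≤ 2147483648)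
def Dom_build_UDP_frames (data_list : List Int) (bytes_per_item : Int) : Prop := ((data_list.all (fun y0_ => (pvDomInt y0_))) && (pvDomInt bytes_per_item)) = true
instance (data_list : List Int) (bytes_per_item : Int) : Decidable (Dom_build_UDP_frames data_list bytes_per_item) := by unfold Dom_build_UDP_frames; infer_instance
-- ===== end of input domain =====

-- B flattens all items into one byte stream and cuts it into frame-sized slices,
-- instead of A's per-frame inner loop over items (objective: alternative decomposition).


-- Shared helper: Python's int.to_bytes(n, 'big', signed=True) as a list of byte values.
-- Exact (two's complement, big-endian) when the value fits in n signed bytes; Python raises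
-- OverflowError outside that range, which Pre_ excludes.
def pyToBytesBE : Nat → Int → List Int
  | 0, _ => []
  | n+1, x => pyToBytesBE n (PySem.Int.floordiv x 256) ++ [PySem.Int.mod x 256]

-- ===== PORT A =====
-- the inner 'for i in range(0, min(items_per_frame, data_cnt - data_list_pos))' loop:
-- returns (frame_data, final data_list_pos).  data_list[data_list_pos] is always in range
-- under Pre_, so the .getD 0 default is never used there.
def pvInnerA (dl : List Int) (nb : Nat) : Nat → Nat → List Int × Nat
  | _, 0 => ([], 0)
  | pos, k+1 =>
      let temp_bytes := pyToBytesBE nb ((PySem.List.pyGet? dl (pos : Int)).getD 0)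
      let r := pvInnerA dl nb (pos + 1) k
      (temp_bytes ++ r.1, r.2 + 1)

-- the outer 'while data_list_pos != data_cnt' loop, with fuel: fuel 0 is where the Python
-- loops forever (items_per_frame ≤ 0 with a nonempty list), excluded by Pre_.
def pvWhileA (dl : List Int) (nb : Nat) (ipf : Int) (cnt : Nat) : Nat → Nat → List (List Int) → List (List Int)
  | 0, _, acc => acc
  | fuel+1, pos, acc =>
      if pos = cnt then acc
      else
        let k := min ipf ((cnt : Int) - (pos : Int))
        let r := pvInnerA dl nb pos k.toNat
        pvWhileA dl nb ipf cnt fuel (pos + r.2) (acc ++ [r.1])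

def build_UDP_frames (data_list : List Int) (bytes_per_item : Int) : List (List Int) :=
  let data_cnt := data_list.length
  -- math.floor(1024 / bytes_per_item): exact as floor division for the integers Pre_ admits
  let items_per_frame := PySem.Int.floordiv 1024 bytes_per_item
  pvWhileA data_list bytes_per_item.toNat items_per_frame data_cnt (data_cnt + 1) 0 []

-- ===== PORT B =====
-- 'while pos != len(all_bytes): chunk = all_bytes[pos:pos+frame_bytes]; …', with fuel as above.
def pvChunkB (ab : List Int) (fb : Int) : Nat → Nat → List (List Int) → List (List Int)
  | 0, _, acc => acc
  | fuel+1, pos, acc =>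
      if pos = ab.length then acc
      else
        let chunk := PySem.List.slice ab (some (pos : Int)) (some ((pos : Int) + fb))
        pvChunkB ab fb fuel (pos + chunk.length) (acc ++ [chunk])

def build_UDP_frames_alt (data_list : List Int) (bytes_per_item : Int) : List (List Int) :=
  let items_per_frame := PySem.Int.floordiv 1024 bytes_per_item
  let frame_bytes := items_per_frame * bytes_per_item
  let all_bytes := data_list.flatMap (fun item => pyToBytesBE bytes_per_item.toNat item)
  pvChunkB all_bytes frame_bytes (all_bytes.length + 1) 0 []

-- ===== PRECONDITION & SPEC =====
-- 'x fits in b signed bytes' (to_bytes does not raise OverflowError); the '5 ≤ b' disjunct is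
-- exact within Dom (|x| ≤ 2^31 always fits in ≥ 5 bytes) and keeps the instance computable.
def pvFits (b x : Int) : Bool :=
  decide (5 ≤ b) || (decide (-(2 ^ (8 * b.toNat - 1)) ≤ x) && decide (x < 2 ^ (8 * b.toNat - 1)))

-- Pre_ = exactly where A returns: bytes_per_item ≠ 0 (else ZeroDivisionError), and for a
-- nonempty list 1 ≤ bytes_per_item ≤ 1024 (else to_bytes raises / the while loop never ends)
-- with every item in signed range (else OverflowError).
def Pre_build_UDP_frames (data_list : List Int) (bytes_per_item : Int) : Prop :=
  bytes_per_item ≠ 0 ∧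
    (data_list = [] ∨
      (1 ≤ bytes_per_item ∧ bytes_per_item ≤ 1024 ∧ ∀ x ∈ data_list, pvFits bytes_per_item x = true))

instance (data_list : List Int) (bytes_per_item : Int) : Decidable (Pre_build_UDP_frames data_list bytes_per_item) := by unfold Pre_build_UDP_frames; infer_instance

def pvWitness_build_UDP_frames : List Int × Int := ([1, -1, 300], 2)

def Spec_build_UDP_frames (data_list : List Int) (bytes_per_item : Int) (out : List (List Int)) : Prop := out = build_UDP_frames_alt data_list bytes_per_item
instance (data_list : List Int) (bytes_per_item : Int) (out : List (List Int)) : Decidable (Spec_build_UDP_frames data_list bytes_per_item out) := by unfold Spec_build_UDP_frames; infer_instance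

-- ===== CLAIM (what is proved, stated in full; the proofs are below) =====
def Claim_equal_build_UDP_frames : Prop := ∀ (data_list : List Int) (bytes_per_item : Int), Dom_build_UDP_frames data_list bytes_per_item → Pre_build_UDP_frames data_list bytes_per_item → Spec_build_UDP_frames data_list bytes_per_item (build_UDP_frames data_list bytes_per_item)

-- ===== LEMMAS AND PROOFS =====

theorem pv_len_toBytes (n : Nat) (x : Int) : (pyToBytesBE n x).length = n := by
  induction n generalizing x with
  | zero => rfl
  | succ m ih => simp [pyToBytesBE, ih]

theorem pv_len_flatMap (nb : Nat) (l : List Int) :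
    (l.flatMap (fun item => pyToBytesBE nb item)).length = l.length * nb := by
  induction l with
  | nil => simp
  | cons a l ih => simp [List.flatMap_cons, ih, pv_len_toBytes, Nat.succ_mul, Nat.add_comm]

theorem pv_innerA_spec (dl : List Int) (nb : Nat) :
    ∀ k pos, pos + k ≤ dl.length →
      pvInnerA dl nb pos k =
        (((dl.drop pos).take k).flatMap (fun item => pyToBytesBE nb item), k) := by
  intro k
  induction k with
  | zero => intro pos _; simp [pvInnerA]
  | succ m ih =>
      intro pos h
      have hlt : pos < dl.length := by omega
      have hdrop : dl.drop pos = dl[pos] :: dl.drop (pos + 1) := List.drop_eq_getElem_cons hlt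
      have hget : (PySem.List.pyGet? dl ((pos : Nat) : Int)).getD 0 = dl[pos] := by
        rw [PySem.List.pyGet?_natCast, List.getElem?_eq_getElem hlt, Option.getD_some]
      simp only [pvInnerA, hget, ih (pos + 1) (by omega), hdrop, List.take_succ_cons,
        List.flatMap_cons]

theorem pv_take_flatMap (nb : Nat) :
    ∀ (l : List Int) (k : Nat),
      (l.flatMap (fun item => pyToBytesBE nb item)).take (k * nb) =
        (l.take k).flatMap (fun item => pyToBytesBE nb item) := by
  intro l
  induction l with
  | nil => simp
  | cons a l ih =>
      intro k
      cases k with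
      | zero => simp
      | succ m =>
          have : (m + 1) * nb = (pyToBytesBE nb a).length + m * nb := by
            simp [pv_len_toBytes]; ring
          simp [List.flatMap_cons, this, List.take_append, ih m]

theorem pv_drop_flatMap (nb : Nat) :
    ∀ (l : List Int) (k : Nat),
      (l.flatMap (fun item => pyToBytesBE nb item)).drop (k * nb) =
        (l.drop k).flatMap (fun item => pyToBytesBE nb item) := by
  intro l
  induction l with
  | nil => simp
  | cons a l ih =>
      intro k
      cases k with
      | zero => simp
      | succ m =>
          have : (m + 1) * nb = (pyToBytesBE nb a).length + m * nb := by
            simp [pv_len_toBytes]; ring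
          simp [List.flatMap_cons, this, List.drop_append, ih m]

theorem pv_loop_eq (dl : List Int) (b : Int) (hb1 : 1 ≤ b) (hb2 : b ≤ 1024) :
    ∀ fA fB pos acc, pos ≤ dl.length → dl.length - pos < fA → dl.length - pos < fB →
      pvWhileA dl b.toNat (PySem.Int.floordiv 1024 b) dl.length fA pos acc =
        pvChunkB (dl.flatMap (fun item => pyToBytesBE b.toNat item))
          (PySem.Int.floordiv 1024 b * b) fB (pos * b.toNat) acc := by
  have hb0 : (0 : Int) < b := by omega
  have hipf1 : (1 : Int) ≤ PySem.Int.floordiv 1024 b :=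
    (PySem.Int.le_floordiv_iff_mul_le hb0).mpr (by omega)
  set f := fun item => pyToBytesBE b.toNat item with hf
  set ipf := PySem.Int.floordiv 1024 b with hipf
  have hnb1 : 1 ≤ b.toNat := by omega
  intro fA
  induction fA with
  | zero => intro fB pos acc h1 h2 _; omega
  | succ fA ih =>
      intro fB pos acc hpos hfA hfB
      obtain ⟨fB, rfl⟩ : ∃ fB', fB = fB' + 1 := ⟨fB - 1, by omega⟩
      by_cases hend : pos = dl.length
      · subst hend
        rw [pvWhileA, pvChunkB, if_pos rfl, if_pos (pv_len_flatMap b.toNat dl).symm]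
      · have hlt : pos < dl.length := by
          omega
        have hBneq : ¬ pos * b.toNat = (dl.flatMap f).length := by
          rw [hf, pv_len_flatMap]
          intro hcontra
          have := Nat.eq_of_mul_eq_mul_right (by omega : 0 < b.toNat) hcontra
          omega
        simp only [pvWhileA, pvChunkB]
        rw [if_neg hend, if_neg hBneq]
        -- the Int minimum and its Nat value
        set k : Int := min ipf ((dl.length : Int) - (pos : Int)) with hk
        have hk1 : 1 ≤ k := by
          rw [hk]; exact le_min hipf1 (by omega)
        have hkn : k.toNat = min ipf.toNat (dl.length - pos) := by
          rw [hk]; omega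
        have hkle : k.toNat ≤ dl.length - pos := by omega
        -- A's frame
        rw [pv_innerA_spec dl b.toNat k.toNat pos (by omega)]
        -- B's chunk: rewrite the slice bound as a Nat cast and reduce to drop/take
        have hfb : ipf * b = ((ipf.toNat * b.toNat : Nat) : Int) := by
          push_cast
          rw [Int.toNat_of_nonneg (by omega), Int.toNat_of_nonneg (by omega)]
        have hslice :
            PySem.List.slice (dl.flatMap f) (some ((pos * b.toNat : Nat) : Int))
              (some (((pos * b.toNat : Nat) : Int) + ipf * b)) =
              ((dl.drop pos).take k.toNat).flatMap f := by
          rw [hfb, PySem.List.slice_natCast_add, pv_drop_flatMap, pv_take_flatMap]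
          congr 1
          rw [List.take_eq_take_iff]
          simp [List.length_drop]
          omega
        rw [hslice]
        have hlenchunk : (((dl.drop pos).take k.toNat).flatMap f).length = k.toNat * b.toNat := by
          rw [pv_len_flatMap, List.length_take, List.length_drop]
          congr 1
          omega
        rw [hlenchunk]
        have hposeq : pos * b.toNat + k.toNat * b.toNat = (pos + k.toNat) * b.toNat := by ring
        rw [hposeq]
        exact ih (fB) (pos + k.toNat) (acc ++ [((dl.drop pos).take k.toNat).flatMap f])
          (by omega) (by omega) (by omega)

-- ===== VERDICT (by name: the statement is the Claim_ definition above) =====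
theorem build_UDP_frames_spec : Claim_equal_build_UDP_frames := by
  intro dl b _ hpre
  unfold Spec_build_UDP_frames build_UDP_frames build_UDP_frames_alt
  obtain ⟨hb0, hcase⟩ := hpre
  rcases hcase with rfl | ⟨hb1, hb2, _⟩
  · simp [pvWhileA, pvChunkB]
  · have := pv_loop_eq dl b hb1 hb2 (dl.length + 1)
      ((dl.flatMap (fun item => pyToBytesBE b.toNat item)).length + 1) 0 []
      (by omega)
      (by omega)
      (by
        rw [pv_len_flatMap]
        have hle : dl.length ≤ dl.length * b.toNat :=
          Nat.le_mul_of_pos_right _ (by omega)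
        omega)
    simpa using this
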